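-- pv_equiv track=rewrite | github.com/alcatraz-rm/python-course-tmp | Проверочная_2/Константин_Лишик_6/1.py | f
-- ===== SOURCE A (Python) =====
-- def f(x):
--     s=str(x)
--     m=[]
--     for i in range(3):
--         m.append(int(s[i])+int(s[i+1]))
--     if m[0]==min(m):
--         ans=int(str(max(m[1], m[2]))+str(min(m[1], m[2])))
--     elif m[1]==min(m):
--         ans=int(str(max(m[0], m[2]))+str(min(m[0], m[2])))
--     else:
--         ans=int(str(max(m[1], m[0]))+str(min(m[1], m[0])))
--     return(ans)
-- ===== SOURCE B (Python) =====
-- def f(x):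
--     s = str(x)
--     m = [int(s[i]) + int(s[i + 1]) for i in range(3)]
--     t = sorted(m)
--     return int(str(t[2]) + str(t[1]))
-- ===== Notes on version B (the rewrite author's own statement) =====
-- stated objective: simpler
-- what changed: replaces the three-way min-location if/elif chain (which drops the minimum sum and orders the remaining pair by hand) with sorting the three adjacent-digit sums and concatenating the top two
import Mathlib
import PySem

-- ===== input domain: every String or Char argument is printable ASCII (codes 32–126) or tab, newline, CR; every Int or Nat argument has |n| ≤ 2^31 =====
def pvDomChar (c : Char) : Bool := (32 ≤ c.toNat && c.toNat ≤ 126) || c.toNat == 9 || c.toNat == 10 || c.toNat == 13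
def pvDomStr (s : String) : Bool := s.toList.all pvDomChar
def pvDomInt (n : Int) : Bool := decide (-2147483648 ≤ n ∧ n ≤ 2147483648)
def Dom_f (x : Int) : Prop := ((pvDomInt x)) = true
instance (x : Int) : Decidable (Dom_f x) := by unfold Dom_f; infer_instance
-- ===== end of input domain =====

-- B replaces A's three-way min-location branching with sorting the three adjacent-digit
-- sums and concatenating the top two (objective: simpler).

-- ===== PORT A =====
def f (x : Int) : Int :=
  let s := PySem.Int.toChars x
  let m := (PySem.List.pyRange 0 3 1).foldl
    (fun m i => m ++ [(PySem.Int.ofChars? [PySem.List.pyGetD s i ' ']).getD 0 +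
                      (PySem.Int.ofChars? [PySem.List.pyGetD s (i + 1) ' ']).getD 0]) []
  let m0 := PySem.List.pyGetD m 0 0
  let m1 := PySem.List.pyGetD m 1 0
  let m2 := PySem.List.pyGetD m 2 0
  let mn := (PySem.List.min? m (fun v => v)).getD 0
  if m0 = mn then
    (PySem.Int.ofChars? (PySem.Int.toChars (max m1 m2) ++ PySem.Int.toChars (min m1 m2))).getD 0
  else if m1 = mn then
    (PySem.Int.ofChars? (PySem.Int.toChars (max m0 m2) ++ PySem.Int.toChars (min m0 m2))).getD 0
  else
    (PySem.Int.ofChars? (PySem.Int.toChars (max m1 m0) ++ PySem.Int.toChars (min m1 m0))).getD 0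

-- ===== PORT B =====
def f_alt (x : Int) : Int :=
  let s := PySem.Int.toChars x
  let m := (PySem.List.pyRange 0 3 1).map
    (fun i => (PySem.Int.ofChars? [PySem.List.pyGetD s i ' ']).getD 0 +
              (PySem.Int.ofChars? [PySem.List.pyGetD s (i + 1) ' ']).getD 0)
  let t := PySem.List.sorted m (fun v => v)
  (PySem.Int.ofChars? (PySem.Int.toChars (PySem.List.pyGetD t 2 0) ++
                       PySem.Int.toChars (PySem.List.pyGetD t 1 0))).getD 0

-- ===== PRECONDITION & SPEC =====
-- A indexes the first four characters of str(x) and parses each as a digit, so it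
-- returns normally exactly when x has at least four decimal digits, i.e. x ≥ 1000.
def Pre_f (x : Int) : Prop := 1000 ≤ x
instance (x : Int) : Decidable (Pre_f x) := by unfold Pre_f; infer_instance
def pvWitness_f : Int := 1234
def Spec_f (x : Int) (out : Int) : Prop := out = f_alt x
instance (x : Int) (out : Int) : Decidable (Spec_f x out) := by unfold Spec_f; infer_instance

-- ===== CLAIM (what is proved, stated in full; the proofs are below) =====
def Claim_equal_f : Prop := ∀ (x : Int), Dom_f x → Pre_f x → Spec_f x (f x)

-- ===== LEMMAS AND PROOFS =====

lemma perm_acb (a b c : Int) : [a, c, b].Perm [a, b, c] := .cons a (.swap b c [])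
lemma perm_cab (a b c : Int) : [c, a, b].Perm [a, b, c] :=
  (List.Perm.swap a c [b]).trans (.cons a (.swap b c []))
lemma perm_bac (a b c : Int) : [b, a, c].Perm [a, b, c] := .swap a b [c]
lemma perm_bca (a b c : Int) : [b, c, a].Perm [a, b, c] :=
  (List.Perm.cons b (.swap a c [])).trans (.swap a b [c])
lemma perm_cba (a b c : Int) : [c, b, a].Perm [a, b, c] :=
  (List.Perm.swap b c [a]).trans (perm_bca a b c)

-- A's selection (drop the minimum of the three, greater remaining first) picks exactly
-- the top two of the sorted triple, for ANY rendering function R.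
lemma sel_eq (R : Int → Int → Int) (a b c : Int) :
    (if a = min (min a b) c then R (max b c) (min b c)
     else if b = min (min a b) c then R (max a c) (min a c)
     else R (max b a) (min b a))
  = R (PySem.List.pyGetD (PySem.List.sorted [a, b, c] (fun v => v)) 2 0)
      (PySem.List.pyGetD (PySem.List.sorted [a, b, c] (fun v => v)) 1 0) := by
  rcases le_total a b with hab | hab <;> rcases le_total b c with hbc | hbc <;>
    rcases le_total a c with hac | hac
  · have hs : (PySem.List.sorted [a, b, c] (fun v => v)) = [a, b, c] :=
      PySem.List.sorted_id_eq_of_perm_of_pairwise _ _ (List.Perm.refl _) (by simp [List.pairwise_cons]; omega)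
    rw [hs]
    simp [PySem.List.pyGetD]
    split_ifs <;> first | (exfalso; omega) | (congr 1 <;> omega)
  · have hs : (PySem.List.sorted [a, b, c] (fun v => v)) = [a, b, c] :=
      PySem.List.sorted_id_eq_of_perm_of_pairwise _ _ (List.Perm.refl _) (by simp [List.pairwise_cons]; omega)
    rw [hs]
    simp [PySem.List.pyGetD]
    split_ifs <;> first | (exfalso; omega) | (congr 1 <;> omega)
  · have hs : (PySem.List.sorted [a, b, c] (fun v => v)) = [a, c, b] :=
      PySem.List.sorted_id_eq_of_perm_of_pairwise _ _ (perm_acb a b c) (by simp [List.pairwise_cons]; omega)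
    rw [hs]
    simp [PySem.List.pyGetD]
    split_ifs <;> first | (exfalso; omega) | (congr 1 <;> omega)
  · have hs : (PySem.List.sorted [a, b, c] (fun v => v)) = [c, a, b] :=
      PySem.List.sorted_id_eq_of_perm_of_pairwise _ _ (perm_cab a b c) (by simp [List.pairwise_cons]; omega)
    rw [hs]
    simp [PySem.List.pyGetD]
    split_ifs <;> first | (exfalso; omega) | (congr 1 <;> omega)
  · have hs : (PySem.List.sorted [a, b, c] (fun v => v)) = [b, a, c] :=
      PySem.List.sorted_id_eq_of_perm_of_pairwise _ _ (perm_bac a b c) (by simp [List.pairwise_cons]; omega)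
    rw [hs]
    simp [PySem.List.pyGetD]
    split_ifs <;> first | (exfalso; omega) | (congr 1 <;> omega)
  · have hs : (PySem.List.sorted [a, b, c] (fun v => v)) = [b, c, a] :=
      PySem.List.sorted_id_eq_of_perm_of_pairwise _ _ (perm_bca a b c) (by simp [List.pairwise_cons]; omega)
    rw [hs]
    simp [PySem.List.pyGetD]
    split_ifs <;> first | (exfalso; omega) | (congr 1 <;> omega)
  · have hs : (PySem.List.sorted [a, b, c] (fun v => v)) = [c, b, a] :=
      PySem.List.sorted_id_eq_of_perm_of_pairwise _ _ (perm_cba a b c) (by simp [List.pairwise_cons]; omega)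
    rw [hs]
    simp [PySem.List.pyGetD]
    split_ifs <;> first | (exfalso; omega) | (congr 1 <;> omega)
  · have hs : (PySem.List.sorted [a, b, c] (fun v => v)) = [c, b, a] :=
      PySem.List.sorted_id_eq_of_perm_of_pairwise _ _ (perm_cba a b c) (by simp [List.pairwise_cons]; omega)
    rw [hs]
    simp [PySem.List.pyGetD]
    split_ifs <;> first | (exfalso; omega) | (congr 1 <;> omega)

lemma range3 : PySem.List.pyRange 0 3 1 = [0, 1, 2] := by decide

-- ===== VERDICT (by name: the statement is the Claim_ definition above) =====
theorem f_spec : Claim_equal_f := by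
  intro x _ _
  unfold Spec_f f f_alt
  rw [range3]
  simp only [List.foldl, List.map, List.nil_append, List.cons_append]
  generalize ((PySem.Int.ofChars? [PySem.List.pyGetD (PySem.Int.toChars x) 0 ' ']).getD 0 +
              (PySem.Int.ofChars? [PySem.List.pyGetD (PySem.Int.toChars x) (0 + 1) ' ']).getD 0) = a
  generalize ((PySem.Int.ofChars? [PySem.List.pyGetD (PySem.Int.toChars x) 1 ' ']).getD 0 +
              (PySem.Int.ofChars? [PySem.List.pyGetD (PySem.Int.toChars x) (1 + 1) ' ']).getD 0) = b
  generalize ((PySem.Int.ofChars? [PySem.List.pyGetD (PySem.Int.toChars x) 2 ' ']).getD 0 +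
              (PySem.Int.ofChars? [PySem.List.pyGetD (PySem.Int.toChars x) (2 + 1) ' ']).getD 0) = c
  have hmin : (PySem.List.min? [a, b, c] (fun v => v)).getD 0 = min (min a b) c := by
    simp [PySem.List.min?_id_cons, List.foldl]
  have hget0 : PySem.List.pyGetD [a, b, c] 0 0 = a := by simp [PySem.List.pyGetD]
  have hget1 : PySem.List.pyGetD [a, b, c] 1 0 = b := by simp [PySem.List.pyGetD]
  have hget2 : PySem.List.pyGetD [a, b, c] 2 0 = c := by simp [PySem.List.pyGetD]
  rw [hmin, hget0, hget1, hget2]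
  exact sel_eq (fun p q => (PySem.Int.ofChars? (PySem.Int.toChars p ++ PySem.Int.toChars q)).getD 0) a b c
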